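-- pv_equiv track=rewrite | github.com/ethorondor/leetcode | code/number_range.py | number_range
-- ===== SOURCE A (Python) =====
-- def number_range(nums, key):
--     l = 0
--     r = len(nums) - 1
--     while l < r:
--         if key > nums[l] or key < nums[r]:
--             if key > nums[l]:
--                 l += 1
--             if key < nums[r]:
--                 r -= 1
--         else:
--             return [l,r]
-- ===== SOURCE B (Python) =====
-- def number_range(nums, key):
--     n = len(nums)
--     lo = next((i for i in range(n) if nums[i] >= key), None)
--     hi = next((j for j in range(n - 1, -1, -1) if nums[j] <= key), None)
--     if lo is not None and hi is not None and lo < hi: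
--         return [lo, hi]
--     return None
-- ===== Notes on version B (the rewrite author's own statement) =====
-- stated objective: simpler
-- what changed: A's single interleaved two-pointer while-loop (both pointers advance per iteration, exit when they cross) is replaced by two independent one-directional searches: first index with nums[i] >= key and last index with nums[j] <= key, returned as [lo, hi] when lo < hi.
import Mathlib
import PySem

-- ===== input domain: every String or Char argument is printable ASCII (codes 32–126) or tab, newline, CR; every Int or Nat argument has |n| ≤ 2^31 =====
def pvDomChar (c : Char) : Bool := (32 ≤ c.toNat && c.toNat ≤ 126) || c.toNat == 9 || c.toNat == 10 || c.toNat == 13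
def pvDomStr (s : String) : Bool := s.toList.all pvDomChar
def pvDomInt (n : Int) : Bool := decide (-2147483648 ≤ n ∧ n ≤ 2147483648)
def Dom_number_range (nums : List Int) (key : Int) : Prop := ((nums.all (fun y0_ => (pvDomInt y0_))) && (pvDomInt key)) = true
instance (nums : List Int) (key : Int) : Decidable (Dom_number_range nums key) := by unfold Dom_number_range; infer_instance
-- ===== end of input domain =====

-- B replaces A's interleaved two-pointer while-loop by two independent directional
-- searches (first index with nums[i] ≥ key, last index with nums[j] ≤ key); same O(n) cost,
-- a plainer decomposition (objective: simpler).

-- ===== PORT A =====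
-- A's while-loop: l and r move toward each other; returns [l, r] when both stop, None when they cross.
def nrLoop (nums : List Int) (key : Int) (l r : Int) : Option (List Int) :=
  if _h : l < r then
    match PySem.List.pyGet? nums l, PySem.List.pyGet? nums r with
    | some a, some b =>
      if _hc : key > a ∨ key < b then
        nrLoop nums key (if key > a then l + 1 else l) (if key < b then r - 1 else r)
      else some [l, r]
    | _, _ => none
  else none
termination_by (r - l).toNat
decreasing_by
  rcases _hc with hc | hc <;> split_ifs <;> omega

def number_range (nums : List Int) (key : Int) : Option (List Int) :=
  nrLoop nums key 0 ((nums.length : Int) - 1)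

-- ===== PORT B =====
-- first index with nums[i] ≥ key (left scan), first index of the reversed list with nums[j] ≤ key
-- (= right-to-left scan of Source B, index hi = n - 1 - j).
def number_range_alt (nums : List Int) (key : Int) : Option (List Int) :=
  match nums.findIdx? (fun x => decide (key ≤ x)),
        nums.reverse.findIdx? (fun x => decide (x ≤ key)) with
  | some lo, some j =>
      if (lo : Int) < (nums.length : Int) - 1 - (j : Int) then
        some [(lo : Int), (nums.length : Int) - 1 - (j : Int)]
      else none
  | _, _ => none

-- ===== PRECONDITION & SPEC =====
def Spec_number_range (nums : List Int) (key : Int) (out : Option (List Int)) : Prop := out = number_range_alt nums key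
instance (nums : List Int) (key : Int) (out : Option (List Int)) : Decidable (Spec_number_range nums key out) := by unfold Spec_number_range; infer_instance

-- ===== CLAIM (what is proved, stated in full; the proofs are below) =====
def Claim_equal_number_range : Prop := ∀ (nums : List Int) (key : Int), Dom_number_range nums key → Spec_number_range nums key (number_range nums key)

-- ===== LEMMAS AND PROOFS =====

-- Loop invariant: everything strictly left of l is < key, everything strictly right of r is > key.
lemma nrLoop_eq (nums : List Int) (key : Int) :
    ∀ (m : Nat) (l r : Int), (r - l).toNat = m → 0 ≤ l → r ≤ (nums.length : Int) - 1 →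
    (∀ (i : Nat) (h : i < nums.length), (i : Int) < l → nums[i] < key) →
    (∀ (j : Nat) (h : j < nums.length), r < (j : Int) → key < nums[j]) →
    nrLoop nums key l r = number_range_alt nums key := by
  intro m
  induction m using Nat.strong_induction_on with
  | _ m IH =>
    intro l r hm hl hr H1 H2
    rw [nrLoop]
    split
    · -- l < r
      rename_i hlr
      have hlN : l.toNat < nums.length := by omega
      have hrN : r.toNat < nums.length := by omega
      rw [PySem.List.pyGet?_eq_some_getElem nums hl (by omega),
          PySem.List.pyGet?_eq_some_getElem nums (i := r) (by omega) (by omega)]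
      show (if _hc : key > nums[l.toNat] ∨ key < nums[r.toNat] then
              nrLoop nums key (if key > nums[l.toNat] then l + 1 else l)
                (if key < nums[r.toNat] then r - 1 else r)
            else some [l, r]) = number_range_alt nums key
      split
      · -- key > a ∨ key < b : recurse
        rename_i hc
        refine IH _ ?_ _ _ rfl ?_ ?_ ?_ ?_
        · rcases hc with hc | hc <;> split_ifs <;> omega
        · split_ifs <;> omega
        · split_ifs <;> omega
        · intro i hlen hi
          split_ifs at hi with hgt
          · by_cases hlt : (i : Int) < l
            · exact H1 i hlen hlt
            · have : i = l.toNat := by omega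
              subst this; exact hgt
          · exact H1 i hlen hi
        · intro j hlen hj
          split_ifs at hj with hlt
          · by_cases hgt : r < (j : Int)
            · exact H2 j hlen hgt
            · have : j = r.toNat := by omega
              subst this; exact hlt
          · exact H2 j hlen hj
      · -- both stopped: A returns [l, r]; show alt does too
        rename_i hc
        rw [not_or] at hc
        obtain ⟨ha0, hb0⟩ := hc
        have ha : key ≤ nums[l.toNat] := not_lt.mp ha0
        have hb : nums[r.toNat] ≤ key := not_lt.mp hb0
        have hfa : nums.findIdx? (fun x => decide (key ≤ x)) = some l.toNat := by
          rw [List.findIdx?_eq_some_iff_getElem]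
          refine ⟨hlN, by simpa using ha, ?_⟩
          intro i hi
          simp only [decide_eq_true_eq, not_le]
          exact H1 i (by omega) (by omega)
        have hfb : nums.reverse.findIdx? (fun x => decide (x ≤ key)) =
            some (nums.length - 1 - r.toNat) := by
          rw [List.findIdx?_eq_some_iff_getElem]
          refine ⟨by simp; omega, ?_, ?_⟩
          · simp only [List.getElem_reverse]
            have hidx : nums.length - 1 - (nums.length - 1 - r.toNat) = r.toNat := by omega
            simp [hidx, hb]
          · intro j hj
            have hjlen : j < nums.length := by omega
            have := List.getElem_reverse (l := nums) (i := j) (by simpa using hjlen)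
            rw [this]
            simp only [decide_eq_true_eq, not_le]
            exact H2 _ (by omega) (by omega)
        rw [number_range_alt, hfa, hfb]
        have h1 : ((l.toNat : Nat) : Int) = l := by omega
        have h2 : (nums.length : Int) - 1 - ((nums.length - 1 - r.toNat : Nat) : Int) = r := by
          omega
        show some [l, r] = if ((l.toNat : Nat) : Int) <
            (nums.length : Int) - 1 - ((nums.length - 1 - r.toNat : Nat) : Int) then
            some [((l.toNat : Nat) : Int),
              (nums.length : Int) - 1 - ((nums.length - 1 - r.toNat : Nat) : Int)]
          else none
        rw [h1, h2, if_pos hlr]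
    · -- l ≥ r : A returns none; show alt = none
      rename_i hlr
      rw [number_range_alt]
      rcases hfa : nums.findIdx? (fun x => decide (key ≤ x)) with _ | lo
      · rfl
      rcases hfb : nums.reverse.findIdx? (fun x => decide (x ≤ key)) with _ | j
      · rfl
      rw [List.findIdx?_eq_some_iff_getElem] at hfa hfb
      obtain ⟨hlo, hplo, _⟩ := hfa
      obtain ⟨hj, hpj, _⟩ := hfb
      have hjlen : j < nums.length := by simpa using hj
      rw [List.getElem_reverse] at hpj
      simp only [decide_eq_true_eq] at hplo hpj
      have hlle : l ≤ (lo : Int) := by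
        by_contra hcon
        exact absurd hplo (not_le.mpr (H1 lo hlo (by omega)))
      have hrge : ((nums.length - 1 - j : Nat) : Int) ≤ r := by
        by_contra hcon
        exact absurd hpj (not_le.mpr (H2 _ (by omega) (by omega)))
      show none = if (lo : Int) < (nums.length : Int) - 1 - (j : Int) then
          some [(lo : Int), (nums.length : Int) - 1 - (j : Int)] else none
      rw [if_neg (show ¬((lo : Int) < (nums.length : Int) - 1 - (j : Int)) by omega)]
termination_by m => m

-- ===== VERDICT (by name: the statement is the Claim_ definition above) =====
theorem number_range_spec : Claim_equal_number_range := by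
  intro nums key _
  unfold Spec_number_range number_range
  apply nrLoop_eq nums key _ 0 ((nums.length : Int) - 1) rfl (le_refl 0) (le_refl _)
  · intro i _ hi; omega
  · intro j hj hgt; omega
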